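-- pv_equiv track=rewrite | github.com/ethansirois/Math-Tutor | main.py | generate_pure_code
-- ===== SOURCE A (Python) =====
-- def generate_pure_code(code):
--     split_up = code.splitlines()
--     in_block = False
--     code_blocks = []
--     start_block = -1
--     for i in range(len(split_up)):
--         if "'''" in split_up[i]:
--             if in_block:
--                 code_blocks.append((start_block, i))
--             else:
--                 start_block = i
--             in_block = not in_block
--     pure_code = ""
--     if len(code_blocks) == 0:
--         pure_code = code
--     elif start_block == -1:
--         return 'FAILURE'
--     for block in code_blocks:
--         for i in range(block[0] + 1, block[1]):
--             pure_code += split_up[i] + '\n'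
--     return pure_code
-- ===== SOURCE B (Python) =====
-- def generate_pure_code(code):
--     in_block = False
--     committed = False
--     buffer = []
--     collected = []
--     for line in code.splitlines():
--         if "'''" in line:
--             if in_block:
--                 collected.extend(buffer)
--                 committed = True
--             else:
--                 buffer = []
--             in_block = not in_block
--         elif in_block:
--             buffer.append(line)
--     if not committed:
--         return code
--     return ''.join(line + '\n' for line in collected)
-- ===== Notes on version B (the rewrite author's own statement) =====
-- stated objective: simpler
-- what changed: A collects (start,end) index pairs in one loop and then re-walks the line list by index ranges in a second nested loop; B makes a single pass over the lines with an in-block buffer and a committed flag and never builds index pairs.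
import Mathlib
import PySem

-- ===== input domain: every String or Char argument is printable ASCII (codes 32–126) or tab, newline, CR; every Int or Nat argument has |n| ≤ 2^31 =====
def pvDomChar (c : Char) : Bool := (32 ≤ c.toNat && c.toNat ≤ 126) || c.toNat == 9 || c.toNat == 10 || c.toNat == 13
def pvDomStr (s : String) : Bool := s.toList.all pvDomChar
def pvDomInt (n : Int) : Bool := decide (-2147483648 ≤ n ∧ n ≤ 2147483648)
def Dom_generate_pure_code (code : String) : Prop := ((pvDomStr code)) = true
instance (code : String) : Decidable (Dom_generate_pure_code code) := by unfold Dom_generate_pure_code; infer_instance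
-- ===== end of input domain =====

-- B replaces A's two-phase index bookkeeping (collect (start,end) index pairs, then re-index the
-- line list) by a single pass with an in-block buffer and a committed flag; objective: simpler.


-- ===== PORT A =====
-- A's first loop: for i in range(len(split_up)): … collecting (in_block, code_blocks, start_block)
def pvScanA (split_up : List String) : Bool × List (Int × Int) × Int :=
  (PySem.List.pyRange 0 (split_up.length : Int) 1).foldl
    (fun (st : Bool × List (Int × Int) × Int) i =>
      if PySem.Str.isIn "'''" (PySem.List.pyGetD split_up i "") then
        if st.1 then (!st.1, st.2.1 ++ [(st.2.2, i)], st.2.2)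
        else (!st.1, st.2.1, i)
      else st)
    (false, [], -1)

-- A's second (nested) loop: for block in code_blocks: for i in range(block[0]+1, block[1]): pure_code += split_up[i] + '\n'
-- (the string accumulator is kept as List Char; Lean's own String append is opaque to the kernel)
def pvRenderA (split_up : List String) (code_blocks : List (Int × Int)) (pure_code : List Char) : List Char :=
  code_blocks.foldl
    (fun pc b =>
      (PySem.List.pyRange (b.1 + 1) b.2 1).foldl
        (fun pc i => pc ++ (PySem.List.pyGetD split_up i "").toList ++ ['\n']) pc)
    pure_code

def generate_pure_code (code : String) : String :=
  let split_up := PySem.Str.splitlines code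
  let st := pvScanA split_up
  let pure_code : List Char := if st.2.1.length = 0 then code.toList else []
  if st.2.1.length ≠ 0 ∧ st.2.2 = -1 then "FAILURE"
  else String.ofList (pvRenderA split_up st.2.1 pure_code)

-- ===== PORT B =====
-- B's single pass: state (in_block, committed, buffer, collected)
def pvPassB (lines : List String) : Bool × Bool × List String × List String :=
  lines.foldl
    (fun (st : Bool × Bool × List String × List String) line =>
      if PySem.Str.isIn "'''" line then
        if st.1 then (false, true, st.2.2.1, st.2.2.2 ++ st.2.2.1)
        else (true, st.2.1, [], st.2.2.2)
      else if st.1 then (st.1, st.2.1, st.2.2.1 ++ [line], st.2.2.2)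
      else st)
    (false, false, [], [])

def generate_pure_code_alt (code : String) : String :=
  let fin := pvPassB (PySem.Str.splitlines code)
  if fin.2.1 then PySem.Str.join "" (fin.2.2.2.map (fun l => l ++ "\n"))
  else code

-- ===== PRECONDITION & SPEC =====
def Spec_generate_pure_code (code : String) (out : String) : Prop := out = generate_pure_code_alt code
instance (code : String) (out : String) : Decidable (Spec_generate_pure_code code out) := by unfold Spec_generate_pure_code; infer_instance

-- ===== CLAIM (what is proved, stated in full; the proofs are below) =====
def Claim_equal_generate_pure_code : Prop := ∀ (code : String), Dom_generate_pure_code code → Spec_generate_pure_code code (generate_pure_code code)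

-- ===== LEMMAS AND PROOFS =====

-- the characters B emits for a list of collected lines
def pvEmit (ls : List String) : List Char := ls.flatMap (fun l => l.toList ++ ['\n'])

-- A's per-index step, with the line passed explicitly
def pvFA (st : Bool × List (Int × Int) × Int) (p : Int × String) : Bool × List (Int × Int) × Int :=
  if PySem.Str.isIn "'''" p.2 then
    if st.1 then (!st.1, st.2.1 ++ [(st.2.2, p.1)], st.2.2)
    else (!st.1, st.2.1, p.1)
  else st

-- B's per-line step
def pvFB (st : Bool × Bool × List String × List String) (line : String) :
    Bool × Bool × List String × List String :=
  if PySem.Str.isIn "'''" line then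
    if st.1 then (false, true, st.2.2.1, st.2.2.2 ++ st.2.2.1)
    else (true, st.2.1, [], st.2.2.2)
  else if st.1 then (st.1, st.2.1, st.2.2.1 ++ [line], st.2.2.2)
  else st

-- a foldl over range(a, a+n) reading L[i] is a foldl over enumerate of the corresponding slice
lemma pvFoldl_pyRange_getD {α σ : Type} (L : List α) (d : α) (g : σ → Int → α → σ) :
    ∀ (n a : Nat) (st : σ), a + n ≤ L.length →
    (PySem.List.pyRange (a : Int) (((a + n : Nat) : Int)) 1).foldl
        (fun st i => g st i (PySem.List.pyGetD L i d)) st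
      = (PySem.List.enumerate ((L.drop a).take n) (a : Int)).foldl (fun st p => g st p.1 p.2) st := by
  intro n
  induction n with
  | zero =>
    intro a st _
    rw [PySem.List.pyRange_one_eq_nil (by push_cast; omega)]
    simp
  | succ n ih =>
    intro a st h
    have ha : a < L.length := by omega
    rw [PySem.List.pyRange_one_cons (by push_cast; omega)]
    rw [List.drop_eq_getElem_cons ha, List.take_succ_cons]
    rw [PySem.List.enumerate_cons]
    simp only [List.foldl_cons]
    have hget : PySem.List.pyGetD L ((a : Int)) d = L[a] := by
      rw [PySem.List.pyGetD_natCast, List.getD_eq_getElem L d ha]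
    rw [hget]
    have hcast : ((a : Int) + 1) = (((a + 1 : Nat)) : Int) := by push_cast; ring
    rw [hcast]
    have hcast2 : (((a + (n + 1) : Nat)) : Int) = (((a + 1 + n : Nat)) : Int) := by push_cast; ring
    rw [hcast2]
    exact ih (a + 1) (g st (a : Int) L[a]) (by omega)

-- an enumerate-fold that ignores the index and appends line+'\n' is pvEmit
lemma pvFoldl_enumerate_emit (S : List String) :
    ∀ (a : Int) (pc : List Char),
    (PySem.List.enumerate S a).foldl (fun pc (p : Int × String) => pc ++ p.2.toList ++ ['\n']) pc
      = pc ++ pvEmit S := by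
  induction S with
  | nil => intro a pc; simp [pvEmit]
  | cons l S ih =>
    intro a pc
    rw [PySem.List.enumerate_cons]
    simp only [List.foldl_cons]
    rw [ih]
    simp [pvEmit]

-- rendering one more (s, e) block appends the lines strictly between s and e
lemma pvRenderA_append (L : List String) (cbs : List (Int × Int)) (pc : List Char)
    (s e : Nat) (hse : s < e) (he : e ≤ L.length) :
    pvRenderA L (cbs ++ [((s : Int), (e : Int))]) pc
      = pvRenderA L cbs pc ++ pvEmit ((L.drop (s + 1)).take (e - s - 1)) := by
  unfold pvRenderA
  rw [List.foldl_append]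
  simp only [List.foldl_cons, List.foldl_nil]
  have hcast : ((s : Int) + 1) = (((s + 1 : Nat)) : Int) := by push_cast; ring
  have hcast2 : ((e : Nat) : Int) = ((((s + 1) + (e - s - 1) : Nat)) : Int) := by push_cast; omega
  rw [hcast, hcast2]
  rw [pvFoldl_pyRange_getD (g := fun pc _ x => pc ++ x.toList ++ ['\n']) L "" (e - s - 1) (s + 1)
      _ (by omega)]
  exact pvFoldl_enumerate_emit _ _ _

-- the coupling invariant between A's scan state and B's pass state after the first a lines
def pvInv (L : List String) (a : Nat) (sa : Bool × List (Int × Int) × Int)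
    (sb : Bool × Bool × List String × List String) : Prop :=
  sb.1 = sa.1 ∧
  sb.2.1 = !sa.2.1.isEmpty ∧
  pvRenderA L sa.2.1 [] = pvEmit sb.2.2.2 ∧
  (sa.1 = true → ∃ s : Nat, sa.2.2 = (s : Int) ∧ s < a ∧
      sb.2.2.1 = (L.drop (s + 1)).take (a - s - 1)) ∧
  (sa.2.1.isEmpty = false → 0 ≤ sa.2.2)

-- what survives of the invariant once the whole list is consumed
def pvFinal (L : List String) (sa : Bool × List (Int × Int) × Int)
    (sb : Bool × Bool × List String × List String) : Prop :=
  sb.2.1 = !sa.2.1.isEmpty ∧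
  pvRenderA L sa.2.1 [] = pvEmit sb.2.2.2 ∧
  (sa.2.1.isEmpty = false → 0 ≤ sa.2.2)

-- one step preserves the invariant
lemma pvInv_step (L : List String) (a : Nat) (ha : a < L.length) (sa sb)
    (h : pvInv L a sa sb) : pvInv L (a + 1) (pvFA sa ((a : Int), L[a])) (pvFB sb L[a]) := by
  obtain ⟨h1, h2, h3, h4, h5⟩ := h
  unfold pvFA pvFB
  by_cases hd : PySem.Str.isIn "'''" L[a] = true
  · simp only [hd, if_true, h1]
    by_cases hb : sa.1 = true
    · -- closing delimiter
      obtain ⟨s, hs, hsa, hbuf⟩ := h4 hb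
      simp only [hb, if_true]
      refine ⟨rfl, by simp, ?_, by simp, ?_⟩
      · rw [hs]
        rw [pvRenderA_append L sa.2.1 [] s a hsa (le_of_lt ha)]
        rw [h3, hbuf]
        simp [pvEmit]
      · intro _; rw [hs]; positivity
    · -- opening delimiter
      simp only [hb]
      simp only [Bool.not_eq_true] at hb
      simp only [Bool.false_eq_true, if_false]
      refine ⟨rfl, h2, h3, ?_, fun h' => by positivity⟩
      intro _
      exact ⟨a, rfl, by omega, by simp⟩
  · have hd' : PySem.Str.isIn "'''" L[a] = false := by simpa using hd
    simp only [hd', Bool.false_eq_true, if_false, h1]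
    by_cases hb : sa.1 = true
    · -- inside a block: B buffers the line, A does nothing
      obtain ⟨s, hs, hsa, hbuf⟩ := h4 hb
      simp only [hb, if_true]
      refine ⟨hb.symm, h2, h3, ?_, h5⟩
      intro _
      refine ⟨s, hs, by omega, ?_⟩
      rw [hbuf]
      have harith : a + 1 - s - 1 = (a - s - 1) + 1 := by omega
      rw [harith, List.take_add_one, List.getElem?_drop]
      have : s + 1 + (a - s - 1) = a := by omega
      rw [this, List.getElem?_eq_getElem ha]
      rfl
    · simp only [Bool.not_eq_true] at hb
      simp only [hb, Bool.false_eq_true, if_false]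
      exact ⟨h1, h2, h3, by simp [hb], h5⟩

-- the main induction: running both folds over the suffix L.drop a preserves the coupling
lemma pvMain (L : List String) :
    ∀ (S : List String) (a : Nat) (sa) (sb), S = L.drop a → pvInv L a sa sb →
    pvFinal L ((PySem.List.enumerate S (a : Int)).foldl pvFA sa) (S.foldl pvFB sb) := by
  intro S
  induction S with
  | nil =>
    intro a sa sb _ h
    simp only [PySem.List.enumerate, List.foldl_nil]
    exact ⟨h.2.1, h.2.2.1, h.2.2.2.2⟩
  | cons l S ih =>
    intro a sa sb hS h
    have ha : a < L.length := by
      by_contra hle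
      rw [List.drop_eq_nil_of_le (by omega)] at hS
      exact List.cons_ne_nil l S hS
    have hdec := List.drop_eq_getElem_cons ha
    rw [← hS] at hdec
    obtain ⟨hl, hS'⟩ : l = L[a] ∧ S = L.drop (a + 1) := by
      injection hdec with h1 h2; exact ⟨h1, h2⟩
    rw [PySem.List.enumerate_cons]
    simp only [List.foldl_cons]
    have hcast : ((a : Int) + 1) = (((a + 1 : Nat)) : Int) := by push_cast; ring
    rw [hcast]
    subst hl
    exact ih (a + 1) _ _ hS' (pvInv_step L a ha sa sb h)

-- B's final join equals pvEmit, character for character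
lemma pvJoin_emit (ls : List String) :
    (PySem.Str.join "" (ls.map (fun l => l ++ "\n"))).toList = pvEmit ls := by
  rw [PySem.Str.toList_join]
  induction ls with
  | nil => simp [pvEmit, PySem.Chars.join_nil]
  | cons l ls ih =>
    cases ls with
    | nil => simp [pvEmit, PySem.Chars.join_singleton]
    | cons l' ls' =>
      simp only [List.map_cons] at ih ⊢
      rw [PySem.Chars.join_cons_cons]
      rw [ih]
      simp [pvEmit]

-- A's scan, rewritten as B's traversal of the line list
lemma pvScanA_eq (L : List String) :
    pvScanA L = (PySem.List.enumerate L (((0 : Nat) : Int))).foldl pvFA (false, [], -1) := by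
  unfold pvScanA
  have key := pvFoldl_pyRange_getD (g := fun st i x => pvFA st (i, x)) L "" L.length 0
      (false, [], -1) (by omega)
  simp only [List.drop_zero, List.take_length] at key
  have h0 : (0 : Int) = ((0 : Nat) : Int) := by norm_num
  have h1 : ((L.length : Nat) : Int) = (((0 + L.length : Nat)) : Int) := by push_cast; ring
  rw [h0, h1]
  exact key

-- ===== VERDICT (by name: the statement is the Claim_ definition above) =====
theorem generate_pure_code_spec : Claim_equal_generate_pure_code := by
  intro code _
  unfold Spec_generate_pure_code generate_pure_code generate_pure_code_alt
  simp only []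
  set L := PySem.Str.splitlines code with hL
  have hfin := pvMain L L 0 (false, [], -1) (false, false, [], []) (by simp)
      (by refine ⟨rfl, rfl, by simp [pvRenderA, pvEmit], by simp, by simp⟩)
  rw [← pvScanA_eq L] at hfin
  have hpass : pvPassB L = L.foldl pvFB (false, false, [], []) := by
    unfold pvPassB pvFB; rfl
  rw [hpass]
  set sa := pvScanA L with hsa
  set sb := L.foldl pvFB (false, false, [], []) with hsb
  obtain ⟨hc, hr, hpos⟩ := hfin
  by_cases hempty : sa.2.1.isEmpty = true
  · -- no complete block: A returns code unchanged, B's committed flag is false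
    have hnil : sa.2.1 = [] := List.isEmpty_iff.mp hempty
    rw [hnil] at hc ⊢
    simp only [List.isEmpty_nil, Bool.not_true] at hc
    rw [hc]
    simp [pvRenderA]
  · simp only [Bool.not_eq_true] at hempty
    have hlen : sa.2.1.length ≠ 0 := by
      cases h : sa.2.1 <;> simp [h] at hempty ⊢
    have hsb2 : sa.2.2 ≠ -1 := by
      intro hm1; have := hpos hempty; omega
    rw [if_neg (by intro ⟨_, h⟩; exact hsb2 h)]
    rw [if_neg hlen, hc, hempty]
    simp only [Bool.not_false, if_true]
    have := pvJoin_emit sb.2.2.2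
    rw [← hr] at this
    rw [← this]
    exact String.ofList_toList
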